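-- pv_equiv track=rewrite | github.com/AlexLesh/TestTasks_Perfomance_Lab-1 | Task1/Task1.py | circular_array
-- ===== SOURCE A (Python) =====
-- def circular_array(n, m):
--     array = m * [i for i in range(1, n + 1)]
--     b = ''
--     for j in range(m-1, m*n, m-1):
--         if array[j] != 1:
--             b += str(array[j-(m-1)])
--         else:
--           b += str(array[j - (m - 1)])
--           break
--     return (b)
-- ===== SOURCE B (Python) =====
-- def circular_array(n, m):
--     # Values are computed arithmetically: position j in the repeated array holds
--     # (j % n) + 1; the walk visits j = k*(m-1) and stops at the first k >= 1
--     # with k*(m-1) divisible by n (k = n at the latest), appending the value at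
--     # the previous stop each time.  No array is built.
--     if n <= 0 or m <= 1:
--         return ''
--     s = m - 1
--     parts = []
--     k = 0
--     while True:
--         parts.append(str(k * s % n + 1))
--         k += 1
--         if k * s % n == 0:
--             break
--     return ''.join(parts)
-- ===== Notes on version B (the rewrite author's own statement) =====
-- stated objective: faster
-- what changed: B never materialises the m*n repeated array: each visited value is (j % n)+1 computed arithmetically, and the walk iterates k = 0,1,... appending str(k*(m-1) % n + 1) until k*(m-1) is divisible by n, so it runs in O(n) steps worst case instead of building and indexing an O(m*n) list.
import Mathlib
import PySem

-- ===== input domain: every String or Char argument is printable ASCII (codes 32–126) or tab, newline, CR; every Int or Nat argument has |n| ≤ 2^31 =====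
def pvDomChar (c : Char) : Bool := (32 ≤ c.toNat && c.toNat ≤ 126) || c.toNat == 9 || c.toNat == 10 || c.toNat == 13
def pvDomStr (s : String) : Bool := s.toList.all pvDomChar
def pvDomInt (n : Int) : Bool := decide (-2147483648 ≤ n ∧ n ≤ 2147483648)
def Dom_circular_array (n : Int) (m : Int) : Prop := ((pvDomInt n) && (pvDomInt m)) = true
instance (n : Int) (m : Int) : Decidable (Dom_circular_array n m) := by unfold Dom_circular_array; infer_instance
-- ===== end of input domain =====

-- B computes each visited value as (index % n)+1 and walks k = 0,1,… until k*(m-1) is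
-- divisible by n, never building the m*n array: asymptotically faster (O(n) worst case vs O(m*n)).

-- ===== PORT A =====
-- 'm * xs' (= PySem.List.pyRepeat xs m); the empty-base guard only models CPython's O(1)
-- repetition of an empty list so the port evaluates, the value is pyRepeat's (pvRepeatA_eq below)
def pvRepeatA (xs : List Int) (m : Int) : List Int :=
  if xs = [] then [] else (List.replicate m.toNat xs).flatten

-- the 'for j in range(m-1, m*n, m-1)' loop with its break; appends str(array[j-(m-1)]) each step
def pvALoop (array : List Int) (s : Int) : List Int → String → String
  | [], b => b
  | j :: js, b =>
    match PySem.List.pyGet? array j with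
    | none => b          -- IndexError: excluded by Pre_
    | some v =>
      match PySem.List.pyGet? array (j - s) with
      | none => b        -- IndexError: excluded by Pre_
      | some w =>
        if v ≠ 1 then pvALoop array s js (b ++ PySem.Int.toStr w)
        else b ++ PySem.Int.toStr w

def circular_array (n : Int) (m : Int) : String :=
  let array := pvRepeatA (PySem.List.pyRange 1 (n+1) 1) m
  pvALoop array (m-1) (PySem.List.pyRange (m-1) (m*n) (m-1)) ""

-- ===== PORT B =====
-- Source B's 'while True' loop; fuel n.toNat only makes it total (the break fires at k ≤ n inside Pre_)
def pvBLoop (n s : Int) : Nat → Int → String → String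
  | 0, _, b => b
  | fuel+1, k, b =>
    let b' := b ++ PySem.Int.toStr (PySem.Int.mod (k * s) n + 1)
    if PySem.Int.mod ((k + 1) * s) n = 0 then b'
    else pvBLoop n s fuel (k + 1) b'

def circular_array_alt (n : Int) (m : Int) : String :=
  if n ≤ 0 || m ≤ 1 then "" else pvBLoop n (m-1) n.toNat 0 ""

-- ===== PRECONDITION & SPEC =====
-- Pre_ excludes exactly the inputs where A raises: m = 1 (range step 0, ValueError) and
-- m ≤ -1 with m*n < m-1 (nonempty walk over the empty array, IndexError).
def Pre_circular_array (n : Int) (m : Int) : Prop := m ≠ 1 ∧ ¬(m ≤ -1 ∧ m * n < m - 1)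
instance (n : Int) (m : Int) : Decidable (Pre_circular_array n m) := by unfold Pre_circular_array; infer_instance
def pvWitness_circular_array : Int × Int := (3, 2)

def Spec_circular_array (n : Int) (m : Int) (out : String) : Prop := out = circular_array_alt n m
instance (n : Int) (m : Int) (out : String) : Decidable (Spec_circular_array n m out) := by unfold Spec_circular_array; infer_instance

-- ===== CLAIM (what is proved, stated in full; the proofs are below) =====
def Claim_equal_circular_array : Prop := ∀ (n : Int) (m : Int), Dom_circular_array n m → Pre_circular_array n m → Spec_circular_array n m (circular_array n m)

-- ===== LEMMAS AND PROOFS =====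

-- element t of c copies of l is element t % l.length of l
theorem pvFlatGet {α : Type} (l : List α) :
    ∀ (c t : Nat), t < c * l.length →
      ((List.replicate c l).flatten)[t]? = l[t % l.length]? := by
  intro c
  induction c with
  | zero => intro t ht; simp at ht
  | succ c ih =>
    intro t ht
    have hsm : (c + 1) * l.length = c * l.length + l.length := Nat.succ_mul c l.length
    simp only [List.replicate_succ, List.flatten_cons]
    by_cases h : t < l.length
    · rw [List.getElem?_append_left h, Nat.mod_eq_of_lt h]
    · have h' : l.length ≤ t := by omega
      rw [List.getElem?_append_right h', ih (t - l.length) (by omega),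
          Nat.mod_eq_sub_mod h']

theorem pvRepeatA_eq (xs : List Int) (m : Int) : pvRepeatA xs m = PySem.List.pyRepeat xs m := by
  unfold pvRepeatA PySem.List.pyRepeat
  split
  · subst ‹xs = []›
    induction m.toNat with
    | zero => simp
    | succ k ih => simpa using ih
  · rfl

-- the repeated array holds (j % n) + 1 at index j
theorem pvGet (n m j : Int) (hn : 1 ≤ n) (hj0 : 0 ≤ j) (hj : j < m * n) :
    PySem.List.pyGet? (pvRepeatA (PySem.List.pyRange 1 (n+1) 1) m) j
      = some (PySem.Int.mod j n + 1) := by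
  have hm : 0 < m := by nlinarith
  have hlen : (PySem.List.pyRange 1 (n+1) 1).length = n.toNat := by
    rw [PySem.List.length_pyRange_one]; omega
  rw [pvRepeatA_eq, PySem.List.pyGet?_of_nonneg _ hj0]
  unfold PySem.List.pyRepeat
  have htn : j.toNat < m.toNat * (PySem.List.pyRange 1 (n+1) 1).length := by
    rw [hlen]
    have : (m.toNat : Int) * (n.toNat : Int) = m * n := by
      rw [Int.toNat_of_nonneg (le_of_lt hm), Int.toNat_of_nonneg (by omega)]
    zify; omega
  rw [pvFlatGet _ _ _ htn, hlen]
  have hmod : j.toNat % n.toNat < (n+1-1).toNat := by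
    have : 0 < n.toNat := by omega
    have := Nat.mod_lt j.toNat this
    omega
  rw [PySem.List.getElem?_pyRange_one, if_pos hmod]
  congr 1
  rw [PySem.Int.mod_eq_emod_of_pos (show (0:Int) < n by omega)]
  have h1 : ((j.toNat % n.toNat : Nat) : Int) = (j.toNat : Int) % (n.toNat : Int) :=
    Int.natCast_mod _ _
  have h2 : (j.toNat : Int) = j := Int.toNat_of_nonneg hj0
  have h3 : (n.toNat : Int) = n := Int.toNat_of_nonneg (by omega)
  rw [h2, h3] at h1
  omega

-- main correspondence between A's break-loop over the j-range and B's counter loop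
theorem pvLoopEq (n m : Int) (hn : 1 ≤ n) (hm : 2 ≤ m) :
    ∀ (fuel c k0 : Nat) (b : String),
      (∃ i : Nat, 1 ≤ i ∧ i ≤ k0 + c ∧ i ≤ k0 + fuel ∧ n ∣ (i : Int) * (m-1)) →
      (∀ i : Nat, 1 ≤ i → i ≤ k0 → ¬ n ∣ (i : Int) * (m-1)) →
      pvALoop (pvRepeatA (PySem.List.pyRange 1 (n+1) 1) m) (m-1)
          (List.map (fun k : Nat => (m-1) + (m-1) * ((k0 : Int) + (k : Int))) (List.range c)) b
        = pvBLoop n (m-1) fuel (k0 : Int) b := by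
  intro fuel
  induction fuel with
  | zero =>
    intro c k0 b hex hk0
    obtain ⟨i, hi1, _, hi3, hdvd⟩ := hex
    exact absurd hdvd (hk0 i hi1 (by omega))
  | succ fuel ih =>
    intro c k0 b hex hk0
    have hk0n : k0 + 1 ≤ n.toNat := by
      by_contra h
      refine hk0 n.toNat (by omega) (by omega) ?_
      have : ((n.toNat : Int)) = n := Int.toNat_of_nonneg (by omega)
      rw [this]; exact Dvd.intro _ rfl
    cases c with
    | zero =>
      obtain ⟨i, hi1, hi2, _, hdvd⟩ := hex
      exact absurd hdvd (hk0 i hi1 (by omega))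
    | succ c =>
      rw [List.range_succ_eq_map, List.map_cons, List.map_map]
      have hfun : ((fun k : Nat => (m-1) + (m-1) * ((k0 : Int) + (k : Int))) ∘ Nat.succ)
          = fun k : Nat => (m-1) + (m-1) * (((k0+1 : Nat) : Int) + (k : Int)) := by
        funext k; simp only [Function.comp_apply]; push_cast; ring
      rw [hfun]
      -- the head index j and the previous index j - (m-1)
      have hcast : ((k0 : Int)) + 0 = (k0 : Int) := by ring
      have hkn : (k0 : Int) + 1 ≤ n := by
        have : ((n.toNat : Int)) = n := Int.toNat_of_nonneg (by omega)
        omega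
      have hz : (0:Int) ≤ (m-1) * (k0 : Int) := mul_nonneg (by omega) (Int.natCast_nonneg k0)
      have hjlt : (m-1) + (m-1) * (k0 : Int) < m * n := by nlinarith [Int.natCast_nonneg k0]
      have hj0 : (0:Int) ≤ (m-1) + (m-1) * (k0 : Int) := by omega
      have hprevlt : (m-1) * (k0 : Int) < m * n := by omega
      unfold pvALoop
      simp only [Nat.cast_zero, add_zero]
      rw [pvGet n m _ hn hj0 hjlt]
      have hsub : (m-1) + (m-1) * (k0 : Int) - (m-1) = (m-1) * (k0 : Int) := by ring
      rw [hsub, pvGet n m _ hn hz hprevlt]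
      simp only [pvBLoop]
      have hargB : ((k0 : Int)) * (m-1) = (m-1) * (k0 : Int) := by ring
      have hargB2 : ((k0 : Int) + 1) * (m-1) = (m-1) + (m-1) * (k0 : Int) := by ring
      rw [hargB, hargB2]
      have hmodpos : 0 ≤ PySem.Int.mod ((m-1) + (m-1) * (k0 : Int)) n :=
        PySem.Int.mod_nonneg _ (by omega : (0:Int) < n)
      by_cases hdvd : PySem.Int.mod ((m-1) + (m-1) * (k0 : Int)) n = 0
      · -- break in both
        rw [if_neg (by omega), if_pos hdvd]
      · -- continue in both
        rw [if_pos (by omega), if_neg hdvd]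
        have hk1 : ((k0 : Int)) + 1 = ((k0 + 1 : Nat) : Int) := by push_cast; ring
        rw [hk1]
        apply ih c (k0+1)
        · obtain ⟨i, hi1, hi2, hi3, hd⟩ := hex
          refine ⟨i, hi1, ?_, by omega, hd⟩
          -- i ≠ k0+1 since the break did not fire
          have hne : i ≠ k0 + 1 := by
            intro he
            apply hdvd
            rw [PySem.Int.mod_eq_zero_iff_dvd]
            have : ((i : Int)) * (m-1) = (m-1) + (m-1) * (k0 : Int) := by
              subst he; push_cast; ring
            rwa [this] at hd
          omega
        · intro i hi1 hi2
          by_cases hie : i = k0 + 1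
          · intro hd
            apply hdvd
            rw [PySem.Int.mod_eq_zero_iff_dvd]
            have : ((i : Int)) * (m-1) = (m-1) + (m-1) * (k0 : Int) := by
              subst hie; push_cast; ring
            rwa [this] at hd
          · exact hk0 i hi1 (by omega)

-- A's j-range, written as a mapped List.range, with at least n.toNat entries
theorem pvRangeShape (n m : Int) (hn : 1 ≤ n) (hm : 2 ≤ m) :
    PySem.List.pyRange (m-1) (m*n) (m-1)
      = List.map (fun k : Nat => (m-1) + (m-1) * (k : Int)) (List.range ((m*n - 1) / (m-1)).toNat)
    ∧ n.toNat ≤ ((m*n - 1) / (m-1)).toNat := by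
  have hs : (0:Int) < m - 1 := by omega
  have hlt : m - 1 < m * n := by nlinarith
  constructor
  · rw [PySem.List.pyRange_of_pos _ _ hs, if_pos hlt]
    congr 2
    ring
  · have : n ≤ (m*n - 1) / (m-1) := by
      rw [Int.le_ediv_iff_mul_le hs]
      nlinarith
    omega

-- empty-walk cases: positive step with stop ≤ start
theorem pvEmptyPos (a b s : Int) (hs : 0 < s) (h : b ≤ a) :
    PySem.List.pyRange a b s = [] := by
  rw [PySem.List.pyRange_of_pos _ _ hs, if_neg (by omega)]
  simp

-- empty-walk cases: negative step with start ≤ stop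
theorem pvEmptyNeg (a b s : Int) (hs : s < 0) (h : a ≤ b) :
    PySem.List.pyRange a b s = [] := by
  unfold PySem.List.pyRange
  rw [if_neg (by omega)]
  simp only [if_neg (by omega : ¬ 0 < s), if_neg (by omega : ¬ b < a)]
  simp

-- ===== VERDICT (by name: the statement is the Claim_ definition above) =====
theorem circular_array_spec : Claim_equal_circular_array := by
  intro n m _ hpre
  obtain ⟨hm1, hneg⟩ := hpre
  unfold Spec_circular_array circular_array circular_array_alt
  by_cases hn : 1 ≤ n
  · by_cases hm : 2 ≤ m
    · -- main case
      rw [if_neg (by simp only [Bool.or_eq_true, decide_eq_true_eq, not_or]; omega)]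
      obtain ⟨hshape, hcount⟩ := pvRangeShape n m hn hm
      rw [hshape]
      have hfun : (fun k : Nat => (m-1) + (m-1) * (k : Int))
          = fun k : Nat => (m-1) + (m-1) * (((0 : Nat) : Int) + (k : Int)) := by
        funext k; push_cast; ring
      rw [hfun]
      have := pvLoopEq n m hn hm n.toNat (((m*n - 1) / (m-1)).toNat) 0 ""
        ⟨n.toNat, by omega, by omega, by omega, by
          have : ((n.toNat : Int)) = n := Int.toNat_of_nonneg (by omega)
          rw [this]; exact Dvd.intro _ rfl⟩
        (by intro i hi1 hi2; omega)
      simpa using this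
    · -- m ≤ 0 (m = 1 excluded): negative step, empty walk
      rw [if_pos (by simp only [Bool.or_eq_true, decide_eq_true_eq]; omega)]
      have hs : m - 1 < 0 := by omega
      have hab : m - 1 ≤ m * n := by
        rcases not_and_or.mp hneg with h | h
        · have h0 : m = 0 := by omega
          subst h0; simp
        · omega
      rw [pvEmptyNeg _ _ _ hs hab]
      rfl
  · by_cases hm : 2 ≤ m
    · -- n ≤ 0, m ≥ 2: positive step, stop ≤ 0 < start
      rw [if_pos (by simp only [Bool.or_eq_true, decide_eq_true_eq]; omega)]
      have hs : (0:Int) < m - 1 := by omega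
      have hab : m * n ≤ m - 1 := by nlinarith
      rw [pvEmptyPos _ _ _ hs hab]
      rfl
    · -- n ≤ 0, m ≤ 0: negative step, empty walk
      rw [if_pos (by simp only [Bool.or_eq_true, decide_eq_true_eq]; omega)]
      have hs : m - 1 < 0 := by omega
      have hab : m - 1 ≤ m * n := by
        rcases not_and_or.mp hneg with h | h
        · have h0 : m = 0 := by omega
          subst h0; simp
        · omega
      rw [pvEmptyNeg _ _ _ hs hab]
      rfl
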